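-- pv_equiv track=rewrite | github.com/SvetlanaMinakova/AbbreviationsSearcher | main.py | find_word_and_its_pos_in_string
-- ===== SOURCE A (Python) =====
-- def find_word_and_its_pos_in_string(string, first_letter, start_pos, end_pos):
--     string_as_words = string.split(" ")
--     word_id = len(string_as_words) - 1
--
--     word_pos_in_str = end_pos
--     while word_id > 0:
--         cur_word = string_as_words[word_id]
--         word_pos_in_str -= len(cur_word)
--         if cur_word.startswith(first_letter) or cur_word.startswith(first_letter.lower()):
--             return cur_word, word_pos_in_str
--         word_id -= 1
--
--     return None, -1
-- ===== SOURCE B (Python) =====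
-- def find_word_and_its_pos_in_string(string, first_letter, start_pos, end_pos):
--     words = string.split(" ")
--     target = None
--     for i, w in enumerate(words):
--         if i > 0 and (w.startswith(first_letter) or w.startswith(first_letter.lower())):
--             target = i
--     if target is None:
--         return None, -1
--     return words[target], end_pos - sum(len(w) for w in words[target:])
-- ===== Notes on version B (the rewrite author's own statement) =====
-- stated objective: alternative
-- what changed: Replaces the backward early-return scan that interleaves incremental position subtraction with a forward last-match search followed by a closed-form position computation (end_pos minus the total length of the suffix words).
import Mathlib
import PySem

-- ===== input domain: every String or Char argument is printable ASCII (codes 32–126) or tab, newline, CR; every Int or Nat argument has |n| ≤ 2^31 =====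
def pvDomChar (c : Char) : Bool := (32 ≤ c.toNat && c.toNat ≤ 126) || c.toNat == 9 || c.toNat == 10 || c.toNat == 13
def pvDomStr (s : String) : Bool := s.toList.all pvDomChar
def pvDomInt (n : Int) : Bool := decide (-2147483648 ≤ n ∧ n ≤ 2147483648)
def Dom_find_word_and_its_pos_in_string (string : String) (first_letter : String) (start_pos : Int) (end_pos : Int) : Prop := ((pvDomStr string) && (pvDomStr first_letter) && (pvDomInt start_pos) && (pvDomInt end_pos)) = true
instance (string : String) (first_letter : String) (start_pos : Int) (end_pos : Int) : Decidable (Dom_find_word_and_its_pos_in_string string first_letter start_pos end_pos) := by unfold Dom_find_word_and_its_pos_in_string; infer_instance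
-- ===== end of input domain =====

-- B replaces A's backward early-return scan (which interleaves position subtraction with the
-- search) by a forward last-match scan followed by a closed-form position computation; same
-- cost, different decomposition (objective: alternative).

-- ===== PORT A =====
-- the backward while-loop of A: word_id counts down from len-1, stopping at 0 (exclusive)
def pvLoopA (words : List String) (first_letter : String) : Nat → Int → Option String × Int
  | 0, _ => (none, -1)
  | i + 1, pos =>
    let cur := words.getD (i + 1) ""
    let pos' := pos - PySem.Str.len cur
    if PySem.Str.startswith cur first_letter || PySem.Str.startswith cur (PySem.Str.lower first_letter) then
      (some cur, pos')
    else
      pvLoopA words first_letter i pos'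

def find_word_and_its_pos_in_string (string : String) (first_letter : String) (start_pos : Int) (end_pos : Int) : Option String × Int :=
  let string_as_words := (PySem.Str.split? string " ").getD []   -- sep " " ≠ "": split? is always some
  pvLoopA string_as_words first_letter (string_as_words.length - 1) end_pos

-- ===== PORT B =====
def find_word_and_its_pos_in_string_alt (string : String) (first_letter : String) (start_pos : Int) (end_pos : Int) : Option String × Int :=
  let words := (PySem.Str.split? string " ").getD []   -- sep " " ≠ "": split? is always some
  let target : Option Int := (PySem.List.enumerate words).foldl
    (fun acc p =>
      if 0 < p.1 && (PySem.Str.startswith p.2 first_letter || PySem.Str.startswith p.2 (PySem.Str.lower first_letter)) then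
        some p.1
      else acc) none
  match target with
  | none => (none, -1)
  | some t =>
    (some (PySem.List.pyGetD words t ""),
     end_pos - ((PySem.List.slice words (some t) none).map (fun w => PySem.Str.len w)).sum)

-- ===== PRECONDITION & SPEC =====
def Spec_find_word_and_its_pos_in_string (string : String) (first_letter : String) (start_pos : Int) (end_pos : Int) (out : Option String × Int) : Prop := out = find_word_and_its_pos_in_string_alt string first_letter start_pos end_pos
instance (string : String) (first_letter : String) (start_pos : Int) (end_pos : Int) (out : Option String × Int) : Decidable (Spec_find_word_and_its_pos_in_string string first_letter start_pos end_pos out) := by unfold Spec_find_word_and_its_pos_in_string; infer_instance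

-- ===== CLAIM (what is proved, stated in full; the proofs are below) =====
def Claim_equal_find_word_and_its_pos_in_string : Prop := ∀ (string : String) (first_letter : String) (start_pos : Int) (end_pos : Int), Dom_find_word_and_its_pos_in_string string first_letter start_pos end_pos → Spec_find_word_and_its_pos_in_string string first_letter start_pos end_pos (find_word_and_its_pos_in_string string first_letter start_pos end_pos)

-- ===== LEMMAS AND PROOFS =====

-- the match predicate both programs test
def pvP (first_letter w : String) : Bool :=
  PySem.Str.startswith w first_letter || PySem.Str.startswith w (PySem.Str.lower first_letter)

-- last index t with 1 ≤ t ≤ i such that words[t] matches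
def pvLM (words : List String) (first_letter : String) : Nat → Option Nat
  | 0 => none
  | i + 1 => if pvP first_letter (words.getD (i + 1) "") then some (i + 1) else pvLM words first_letter i

-- total length of words[t..i]
def pvS (words : List String) (t i : Nat) : Int :=
  ((List.range' t (i + 1 - t)).map (fun j => PySem.Str.len (words.getD j ""))).sum

theorem pvLM_succ (words : List String) (fl : String) (i : Nat) :
    pvLM words fl (i + 1) = if pvP fl (words.getD (i + 1) "") then some (i + 1) else pvLM words fl i := rfl

theorem pvLoopA_succ (words : List String) (fl : String) (i : Nat) (pos : Int) :
    pvLoopA words fl (i + 1) pos =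
      (if pvP fl (words.getD (i + 1) "") then
        (some (words.getD (i + 1) ""), pos - PySem.Str.len (words.getD (i + 1) ""))
      else pvLoopA words fl i (pos - PySem.Str.len (words.getD (i + 1) ""))) := rfl

theorem pvLM_bounds (words : List String) (fl : String) :
    ∀ i t, pvLM words fl i = some t → 1 ≤ t ∧ t ≤ i := by
  intro i
  induction i with
  | zero => intro t h; simp [pvLM] at h
  | succ i ih =>
    intro t h
    rw [pvLM_succ] at h
    split at h
    · cases h; omega
    · have := ih t h; omega

theorem pvS_self (words : List String) (i : Nat) :
    pvS words i i = PySem.Str.len (words.getD i "") := by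
  unfold pvS; simp

theorem pvS_succ (words : List String) (t i : Nat) (ht : t ≤ i + 1) :
    pvS words t (i + 1) = pvS words t i + PySem.Str.len (words.getD (i + 1) "") := by
  unfold pvS
  have h1 : i + 1 + 1 - t = (i + 1 - t) + 1 := by omega
  rw [h1, List.range'_concat]
  have h2 : t + (i + 1 - t) = i + 1 := by omega
  simp [h2]

theorem pvLoopA_eq (words : List String) (fl : String) :
    ∀ i pos, pvLoopA words fl i pos =
      match pvLM words fl i with
      | none => (none, -1)
      | some t => (some (words.getD t ""), pos - pvS words t i) := by
  intro i
  induction i with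
  | zero => intro pos; simp [pvLoopA, pvLM]
  | succ i ih =>
    intro pos
    rw [pvLoopA_succ, pvLM_succ]
    by_cases hc : pvP fl (words.getD (i + 1) "") = true
    · rw [if_pos hc, if_pos hc]
      simp [pvS_self]
    · rw [if_neg hc, if_neg hc, ih]
      cases hlm : pvLM words fl i with
      | none => simp
      | some t =>
        have hb := pvLM_bounds words fl i t hlm
        simp only [Prod.mk.injEq]
        rw [pvS_succ words t i (by omega)]
        exact ⟨trivial, by omega⟩

-- pvLM only looks at indices ≤ i, so a longer list with the same prefix agrees
theorem pvLM_prefix (ys : List String) (x : String) (fl : String) :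
    ∀ i, i < ys.length → pvLM (ys ++ [x]) fl i = pvLM ys fl i := by
  intro i
  induction i with
  | zero => intro _; simp [pvLM]
  | succ i ih =>
    intro hi
    rw [pvLM_succ, pvLM_succ]
    have hg : (ys ++ [x]).getD (i + 1) "" = ys.getD (i + 1) "" := by
      have : i + 1 < ys.length := hi
      simp [List.getD, List.getElem?_append_left this]
    rw [hg, ih (by omega)]

-- B's forward foldl over enumerate computes the last matching index > 0
theorem pvFold_eq (fl : String) (words : List String) :
    ((PySem.List.enumerate words).foldl
      (fun acc p =>
        if 0 < p.1 && (PySem.Str.startswith p.2 fl || PySem.Str.startswith p.2 (PySem.Str.lower fl)) then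
          some p.1
        else acc) none)
    = Option.map (fun t : Nat => (t : Int)) (pvLM words fl (words.length - 1)) := by
  induction words using List.reverseRecOn with
  | nil => simp [PySem.List.enumerate_nil, pvLM]
  | append_singleton ys x ih =>
    rw [PySem.List.enumerate_append, List.foldl_append]
    simp only [PySem.List.enumerate_cons, PySem.List.enumerate_nil, List.foldl_cons, List.foldl_nil]
    rw [ih]
    cases ys with
    | nil => simp [pvLM]
    | cons y ys' =>
      have hgx : ((y :: ys') ++ [x]).getD (ys'.length + 1) "" = x := by
        simp [List.getD]
      have hlen1 : ((y :: ys') ++ [x]).length - 1 = ys'.length + 1 := by simp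
      have hlen2 : (y :: ys').length - 1 = ys'.length := by simp
      rw [hlen1, hlen2, pvLM_succ, hgx, pvLM_prefix (y :: ys') x fl ys'.length (by simp)]
      simp only [pvP]
      by_cases hp : (PySem.Str.startswith x fl || PySem.Str.startswith x (PySem.Str.lower fl)) = true
      · simp only [hp, Bool.and_true]
        rw [if_pos True.intro]
        have h0 : (0 : Int) < 0 + ((y :: ys').length : Int) := by
          simp only [List.length_cons]
          push_cast
          omega
        rw [if_pos (decide_eq_true h0)]
        simp only [Option.map_some, Option.some.injEq, List.length_cons]
        push_cast
        ring
      · rw [Bool.not_eq_true] at hp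
        simp only [hp, Bool.and_false, Bool.false_eq_true, if_false]

-- words.drop t written as the indexed range A accumulates over
theorem pvDrop_eq_range (words : List String) (t : Nat) (ht : t ≤ words.length) :
    words.drop t = (List.range' t (words.length - t)).map (fun j => words.getD j "") := by
  apply List.ext_getElem
  · simp
  · intro k h1 h2
    have hk : t + k < words.length := by
      simp at h1; omega
    simp [List.getElem_drop, List.getElem_range', List.getD, List.getElem?_eq_getElem hk]

-- A's port, characterised through pvLM/pvS
theorem pvA_eq (s fl : String) (sp ep : Int) :
    find_word_and_its_pos_in_string s fl sp ep =
      match pvLM ((PySem.Str.split? s " ").getD []) fl (((PySem.Str.split? s " ").getD []).length - 1) with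
      | none => (none, -1)
      | some t => (some (((PySem.Str.split? s " ").getD []).getD t ""),
          ep - pvS ((PySem.Str.split? s " ").getD []) t (((PySem.Str.split? s " ").getD []).length - 1)) :=
  pvLoopA_eq ((PySem.Str.split? s " ").getD []) fl (((PySem.Str.split? s " ").getD []).length - 1) ep

-- B's port, characterised through pvLM/pvS
theorem pvB_eq (s fl : String) (sp ep : Int) :
    find_word_and_its_pos_in_string_alt s fl sp ep =
      match pvLM ((PySem.Str.split? s " ").getD []) fl (((PySem.Str.split? s " ").getD []).length - 1) with
      | none => (none, -1)
      | some t => (some (((PySem.Str.split? s " ").getD []).getD t ""),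
          ep - pvS ((PySem.Str.split? s " ").getD []) t (((PySem.Str.split? s " ").getD []).length - 1)) := by
  have h := pvFold_eq fl ((PySem.Str.split? s " ").getD [])
  cases hlm : pvLM ((PySem.Str.split? s " ").getD []) fl (((PySem.Str.split? s " ").getD []).length - 1) with
  | none =>
    rw [hlm] at h
    simp only [Option.map_none] at h
    unfold find_word_and_its_pos_in_string_alt
    simp only [h]
  | some t =>
    have hb := pvLM_bounds ((PySem.Str.split? s " ").getD []) fl (((PySem.Str.split? s " ").getD []).length - 1) t hlm
    have htlt : t < ((PySem.Str.split? s " ").getD []).length := by omega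
    rw [hlm] at h
    simp only [Option.map_some] at h
    unfold find_word_and_its_pos_in_string_alt
    simp only [h, PySem.List.pyGetD_natCast, PySem.List.slice_from_natCast, Prod.mk.injEq]
    refine ⟨trivial, ?_⟩
    rw [pvDrop_eq_range ((PySem.Str.split? s " ").getD []) t (by omega)]
    unfold pvS
    have hcount : ((PySem.Str.split? s " ").getD []).length - t
        = (((PySem.Str.split? s " ").getD []).length - 1) + 1 - t := by omega
    rw [hcount]
    simp only [List.map_map]
    rfl

-- ===== VERDICT (by name: the statement is the Claim_ definition above) =====
theorem find_word_and_its_pos_in_string_spec : Claim_equal_find_word_and_its_pos_in_string := by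
  intro string first_letter start_pos end_pos _
  unfold Spec_find_word_and_its_pos_in_string
  rw [pvA_eq string first_letter start_pos end_pos, pvB_eq string first_letter start_pos end_pos]
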